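-- pv_equiv track=rewrite | github.com/Davood121/Personality-Ai_2 | Personality Ai/main_ai.py | _extract_knowledge_for_adaptation
-- ===== SOURCE A (Python) =====
-- from typing import Dict, List, Any, Optional
--
-- def _extract_knowledge_for_adaptation(knowledge_list: List[Dict]) -> Dict[str, Any]:
--     """Extract knowledge from memory for adaptive response generation"""
--     extracted = {
--         'definitions': [],
--         'interesting_facts': [],
--         'examples': []
--     }
--
--     for knowledge in knowledge_list:
--         info = knowledge.get('information', {})
--         if info.get('definitions'):
--             extracted['definitions'].extend(info['definitions'])
--         if info.get('interesting_facts'):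
--             extracted['interesting_facts'].extend(info['interesting_facts'])
--         if info.get('examples'):
--             extracted['examples'].extend(info['examples'])
--
--     return extracted
-- ===== SOURCE B (Python) =====
-- from typing import Dict, List, Any, Optional
--
-- def _extract_knowledge_for_adaptation(knowledge_list: List[Dict]) -> Dict[str, Any]:
--     """Extract knowledge via divide-and-conquer: split the list in half,
--     combine the three per-half results by concatenation (depth O(log n))."""
--     def go(lo: int, hi: int):
--         if hi - lo == 0:
--             return [], [], []
--         if hi - lo == 1:
--             info = knowledge_list[lo].get('information', {})
--             return (list(info.get('definitions') or []),
--                     list(info.get('interesting_facts') or []),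
--                     list(info.get('examples') or []))
--         mid = (lo + hi) // 2
--         ld, lf, le = go(lo, mid)
--         rd, rf, re_ = go(mid, hi)
--         return ld + rd, lf + rf, le + re_
--
--     d, f, e = go(0, len(knowledge_list))
--     return {'definitions': d, 'interesting_facts': f, 'examples': e}
-- ===== Notes on version B (the rewrite author's own statement) =====
-- stated objective: alternative
-- what changed: Replaces the single linear loop mutating a three-list accumulator dict by a divide-and-conquer recursion that splits the list in half and merges the per-half (definitions, facts, examples) triples by concatenation; correct because list concatenation is associative.
import Mathlib
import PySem

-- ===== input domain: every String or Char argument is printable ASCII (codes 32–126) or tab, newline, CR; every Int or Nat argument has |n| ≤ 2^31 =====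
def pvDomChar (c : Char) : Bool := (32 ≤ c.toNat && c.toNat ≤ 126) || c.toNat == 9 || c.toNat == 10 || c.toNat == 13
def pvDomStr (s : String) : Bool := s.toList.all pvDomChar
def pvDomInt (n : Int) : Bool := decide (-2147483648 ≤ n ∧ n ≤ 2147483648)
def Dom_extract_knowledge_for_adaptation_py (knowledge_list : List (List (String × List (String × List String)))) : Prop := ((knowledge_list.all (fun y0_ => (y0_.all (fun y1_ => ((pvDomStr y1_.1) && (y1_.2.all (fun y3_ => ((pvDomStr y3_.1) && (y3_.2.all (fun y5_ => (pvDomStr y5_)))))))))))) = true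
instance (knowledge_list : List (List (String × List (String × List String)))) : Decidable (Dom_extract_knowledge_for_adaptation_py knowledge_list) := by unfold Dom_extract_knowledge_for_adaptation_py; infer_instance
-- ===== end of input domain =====

-- B replaces the single fused accumulator loop by a divide-and-conquer recursion
-- (split in half, concatenate the per-half triples); same result, alternative structure.

-- ===== PORT A =====
def extract_knowledge_for_adaptation_py (knowledge_list : List (List (String × List (String × List String)))) : List (String × List String) :=
  let acc := knowledge_list.foldl
    (fun (acc : List String × List String × List String) knowledge =>
      let info := (knowledge.lookup "information").getD []
      let d := match info.lookup "definitions" with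
        | some ds => if ds.isEmpty then acc.1 else acc.1 ++ ds
        | none => acc.1
      let f := match info.lookup "interesting_facts" with
        | some fs => if fs.isEmpty then acc.2.1 else acc.2.1 ++ fs
        | none => acc.2.1
      let e := match info.lookup "examples" with
        | some es => if es.isEmpty then acc.2.2 else acc.2.2 ++ es
        | none => acc.2.2
      (d, f, e))
    ([], [], [])
  [("definitions", acc.1), ("interesting_facts", acc.2.1), ("examples", acc.2.2)]

-- ===== PORT B =====
-- k.get('information', {}).get(key) or []  (first-match lookup, falsy → [])
def pvInfoList (knowledge : List (String × List (String × List String))) (key : String) : List String :=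
  ((((knowledge.lookup "information").getD []).lookup key).getD [])

-- B's `go`: recursion on halves (lo..hi slicing ported as take/drop at the midpoint);
-- the fuel argument (initialised to the list length, which bounds the recursion) only makes
-- the halving recursion structural — it never alters the computation.
def pvGoF (fuel : Nat) (kl : List (List (String × List (String × List String)))) : List String × List String × List String :=
  match fuel with
  | 0 => ([], [], [])
  | fuel + 1 =>
    if kl.length ≤ 1 then
      match kl with
      | [] => ([], [], [])
      | k :: _ => (pvInfoList k "definitions", pvInfoList k "interesting_facts", pvInfoList k "examples")
    else
      let mid := kl.length / 2
      let l := pvGoF fuel (kl.take mid)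
      let r := pvGoF fuel (kl.drop mid)
      (l.1 ++ r.1, l.2.1 ++ r.2.1, l.2.2 ++ r.2.2)

def pvGo (kl : List (List (String × List (String × List String)))) : List String × List String × List String :=
  pvGoF kl.length kl

def extract_knowledge_for_adaptation_py_alt (knowledge_list : List (List (String × List (String × List String)))) : List (String × List String) :=
  let t := pvGo knowledge_list
  [("definitions", t.1), ("interesting_facts", t.2.1), ("examples", t.2.2)]

-- ===== PRECONDITION & SPEC =====
def Spec_extract_knowledge_for_adaptation_py (knowledge_list : List (List (String × List (String × List String)))) (out : List (String × List String)) : Prop := out = extract_knowledge_for_adaptation_py_alt knowledge_list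
instance (knowledge_list : List (List (String × List (String × List String)))) (out : List (String × List String)) : Decidable (Spec_extract_knowledge_for_adaptation_py knowledge_list out) := by unfold Spec_extract_knowledge_for_adaptation_py; infer_instance

-- ===== CLAIM (what is proved, stated in full; the proofs are below) =====
def Claim_equal_extract_knowledge_for_adaptation_py : Prop := ∀ (knowledge_list : List (List (String × List (String × List String)))), Dom_extract_knowledge_for_adaptation_py knowledge_list → Spec_extract_knowledge_for_adaptation_py knowledge_list (extract_knowledge_for_adaptation_py knowledge_list)

-- ===== LEMMAS AND PROOFS =====
-- one step of A's fold appends exactly pvInfoList for each component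
theorem pvStep_eq (acc : List String × List String × List String)
    (k : List (String × List (String × List String))) :
    (let info := (k.lookup "information").getD []
     let d := match info.lookup "definitions" with
        | some ds => if ds.isEmpty then acc.1 else acc.1 ++ ds
        | none => acc.1
     let f := match info.lookup "interesting_facts" with
        | some fs => if fs.isEmpty then acc.2.1 else acc.2.1 ++ fs
        | none => acc.2.1
     let e := match info.lookup "examples" with
        | some es => if es.isEmpty then acc.2.2 else acc.2.2 ++ es
        | none => acc.2.2
     ((d, f, e) : List String × List String × List String))
    = (acc.1 ++ pvInfoList k "definitions", acc.2.1 ++ pvInfoList k "interesting_facts",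
       acc.2.2 ++ pvInfoList k "examples") := by
  simp only [pvInfoList]
  obtain ⟨a, b, c⟩ := acc
  cases hd : (((k.lookup "information").getD []).lookup "definitions") <;>
  cases hf : (((k.lookup "information").getD []).lookup "interesting_facts") <;>
  cases he : (((k.lookup "information").getD []).lookup "examples") <;>
    simp_all

-- A's fold computes the three flattened lists
theorem pvFold_eq (kl : List (List (String × List (String × List String))))
    (acc : List String × List String × List String) :
    kl.foldl
      (fun (acc : List String × List String × List String) knowledge =>
        let info := (knowledge.lookup "information").getD []
        let d := match info.lookup "definitions" with
          | some ds => if ds.isEmpty then acc.1 else acc.1 ++ ds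
          | none => acc.1
        let f := match info.lookup "interesting_facts" with
          | some fs => if fs.isEmpty then acc.2.1 else acc.2.1 ++ fs
          | none => acc.2.1
        let e := match info.lookup "examples" with
          | some es => if es.isEmpty then acc.2.2 else acc.2.2 ++ es
          | none => acc.2.2
        (d, f, e)) acc
    = (acc.1 ++ kl.flatMap (fun k => pvInfoList k "definitions"),
       acc.2.1 ++ kl.flatMap (fun k => pvInfoList k "interesting_facts"),
       acc.2.2 ++ kl.flatMap (fun k => pvInfoList k "examples")) := by
  induction kl generalizing acc with
  | nil => simp
  | cons k kl ih =>
    rw [List.foldl_cons, pvStep_eq, ih]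
    simp

-- B's divide-and-conquer computes the same three flattened lists
theorem pvGoF_eq (fuel : Nat) (kl : List (List (String × List (String × List String))))
    (hf : kl.length ≤ fuel) :
    pvGoF fuel kl = (kl.flatMap (fun k => pvInfoList k "definitions"),
                     kl.flatMap (fun k => pvInfoList k "interesting_facts"),
                     kl.flatMap (fun k => pvInfoList k "examples")) := by
  induction fuel generalizing kl with
  | zero =>
    have : kl = [] := List.eq_nil_of_length_eq_zero (Nat.le_zero.mp hf)
    subst this; simp [pvGoF]
  | succ fuel ih =>
    by_cases h1 : kl.length ≤ 1
    · match kl, h1 with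
      | [], _ => simp [pvGoF]
      | [k], _ => simp [pvGoF]
    · rw [pvGoF.eq_def]
      dsimp only
      rw [if_neg h1]
      have hlen : 2 ≤ kl.length := by omega
      have ht : (kl.take (kl.length / 2)).length ≤ fuel := by
        simp only [List.length_take]; omega
      have hd : (kl.drop (kl.length / 2)).length ≤ fuel := by
        simp only [List.length_drop]; omega
      simp only [ih _ ht, ih _ hd]
      rw [← List.flatMap_append, ← List.flatMap_append, ← List.flatMap_append,
          List.take_append_drop]

theorem pvGo_eq (kl : List (List (String × List (String × List String)))) :
    pvGo kl = (kl.flatMap (fun k => pvInfoList k "definitions"),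
               kl.flatMap (fun k => pvInfoList k "interesting_facts"),
               kl.flatMap (fun k => pvInfoList k "examples")) :=
  pvGoF_eq kl.length kl (Nat.le_refl _)

-- ===== VERDICT (by name: the statement is the Claim_ definition above) =====
theorem extract_knowledge_for_adaptation_py_spec : Claim_equal_extract_knowledge_for_adaptation_py := by
  intro kl _
  unfold Spec_extract_knowledge_for_adaptation_py extract_knowledge_for_adaptation_py extract_knowledge_for_adaptation_py_alt
  rw [pvFold_eq, pvGo_eq]
  simp
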